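-- pv_equiv track=rewrite | github.com/jhwa426/Python | COMPSCI 130/Laboratory/Week08/Lab 11.py | palindrome_filter
-- ===== SOURCE A (Python) =====
-- def palindrome_filter(sentence):
--     if len(sentence) > 0:
--         first_word = sentence[0]
--         rest_word = palindrome_filter(sentence[1:])
--         if first_word.isalpha() == True:
--             return first_word.lower() + rest_word
--         else:
--             return rest_word
--     else:
--         return ""
-- ===== SOURCE B (Python) =====
-- def palindrome_filter(sentence):
--     result = []
--     for ch in sentence:
--         if ch.isalpha():
--             result.append(ch.lower())
--     return "".join(result)
-- ===== Notes on version B (the rewrite author's own statement) =====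
-- stated objective: faster
-- what changed: Replaced the tail recursion over sentence[1:] (which copies the remaining string at every step) with a single flat iterative pass appending matching lowercased characters to an accumulator list.
import Mathlib
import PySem

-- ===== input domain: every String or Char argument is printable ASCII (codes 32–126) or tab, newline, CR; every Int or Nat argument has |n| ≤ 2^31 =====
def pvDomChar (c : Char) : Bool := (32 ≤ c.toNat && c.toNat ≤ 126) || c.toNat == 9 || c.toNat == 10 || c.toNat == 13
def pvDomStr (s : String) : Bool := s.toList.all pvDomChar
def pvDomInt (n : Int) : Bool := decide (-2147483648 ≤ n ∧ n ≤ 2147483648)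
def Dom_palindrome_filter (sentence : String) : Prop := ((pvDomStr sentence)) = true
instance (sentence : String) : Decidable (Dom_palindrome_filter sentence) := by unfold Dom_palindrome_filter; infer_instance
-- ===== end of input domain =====

-- B replaces A's tail recursion over sentence[1:] with one flat loop over the
-- characters appending lowercased alphabetic characters to an accumulator (faster: no per-step string copy).
-- ===== PORT A =====
-- A recurses on the string: first char + recursive call on the rest.
def pfRecA : List Char → List Char
  | [] => []
  | first_word :: rest =>
      let rest_word := pfRecA rest
      if PySem.Chars.isalpha first_word = true then
        PySem.Chars.lowerChar first_word :: rest_word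
      else
        rest_word

def palindrome_filter (sentence : String) : String :=
  String.mk (pfRecA sentence.toList)

-- ===== PORT B =====
-- B: explicit accumulator loop over the characters.
def palindrome_filter_alt (sentence : String) : String :=
  String.mk (sentence.toList.foldl
    (fun acc ch => if PySem.Chars.isalpha ch = true then acc ++ [PySem.Chars.lowerChar ch] else acc) [])

-- ===== PRECONDITION & SPEC =====
def Spec_palindrome_filter (sentence : String) (out : String) : Prop := out = palindrome_filter_alt sentence
instance (sentence : String) (out : String) : Decidable (Spec_palindrome_filter sentence out) := by unfold Spec_palindrome_filter; infer_instance

-- ===== CLAIM (what is proved, stated in full; the proofs are below) =====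
def Claim_equal_palindrome_filter : Prop := ∀ (sentence : String), Dom_palindrome_filter sentence → Spec_palindrome_filter sentence (palindrome_filter sentence)

-- ===== LEMMAS AND PROOFS =====

-- ===== VERDICT (by name: the statement is the Claim_ definition above) =====
theorem pfFoldl_eq (cs : List Char) (acc : List Char) :
    cs.foldl (fun acc ch => if PySem.Chars.isalpha ch = true then acc ++ [PySem.Chars.lowerChar ch] else acc) acc
      = acc ++ pfRecA cs := by
  induction cs generalizing acc with
  | nil => simp [pfRecA]
  | cons c rest ih =>
      simp only [List.foldl_cons, pfRecA]
      split <;> simp [ih]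

theorem palindrome_filter_spec : Claim_equal_palindrome_filter := by
  intro sentence _
  unfold Spec_palindrome_filter palindrome_filter palindrome_filter_alt
  rw [pfFoldl_eq]
  simp
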